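-- pv_equiv track=rewrite | github.com/IroiseStudio/sentiment-analysis-techniques | tabs/nlp/select_tab.py | _guess_label
-- ===== SOURCE A (Python) =====
-- from typing import Callable, Optional, Dict, Any, List
--
-- def _guess_label(labels: List[str], target: str) -> Optional[str]:
--     # find a label in labels matching target (case-insensitive substring)
--     t = target.lower()
--     for lab in labels:
--         if lab.lower() == t:
--             return lab
--     for lab in labels:
--         if t in lab.lower() or lab.lower() in t:
--             return lab
--     return None
-- ===== SOURCE B (Python) =====
-- from typing import Optional, List
--
-- def _guess_label(labels: List[str], target: str) -> Optional[str]: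
--     # one pass: return first exact (case-insensitive) match immediately;
--     # remember the first substring match as a fallback candidate
--     t = target.lower()
--     candidate = None
--     for lab in labels:
--         low = lab.lower()
--         if low == t:
--             return lab
--         if candidate is None and (t in low or low in t):
--             candidate = lab
--     return candidate
-- ===== Notes on version B (the rewrite author's own statement) =====
-- stated objective: alternative
-- what changed: Fuses A's two scans into a single pass that returns an exact match immediately and remembers the first substring match as a fallback candidate, lowering each label once.
import Mathlib
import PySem

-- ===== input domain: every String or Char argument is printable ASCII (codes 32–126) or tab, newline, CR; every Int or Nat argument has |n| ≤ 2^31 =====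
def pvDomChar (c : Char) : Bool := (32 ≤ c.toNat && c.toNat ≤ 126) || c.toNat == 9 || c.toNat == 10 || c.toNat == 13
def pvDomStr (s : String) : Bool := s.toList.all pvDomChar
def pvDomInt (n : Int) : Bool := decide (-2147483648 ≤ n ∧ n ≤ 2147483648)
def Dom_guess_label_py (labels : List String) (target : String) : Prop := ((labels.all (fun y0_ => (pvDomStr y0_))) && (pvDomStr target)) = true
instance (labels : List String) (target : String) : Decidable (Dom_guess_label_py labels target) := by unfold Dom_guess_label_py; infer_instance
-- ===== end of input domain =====

-- B fuses A's two scans into one pass with a remembered first-substring candidate; return values are identical on the whole domain.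

-- ===== PORT A =====
-- first loop of A: return the first label whose lowercase equals t
def pvLoopExact (labels : List String) (t : String) : Option String :=
  match labels with
  | [] => none
  | lab :: rest => if PySem.Str.lower lab = t then some lab else pvLoopExact rest t

-- second loop of A: return the first label for which (t in low or low in t)
def pvLoopSub (labels : List String) (t : String) : Option String :=
  match labels with
  | [] => none
  | lab :: rest =>
      if PySem.Str.isIn t (PySem.Str.lower lab) || PySem.Str.isIn (PySem.Str.lower lab) t
      then some lab else pvLoopSub rest t

def guess_label_py (labels : List String) (target : String) : Option String :=
  let t := PySem.Str.lower target
  match pvLoopExact labels t with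
  | some lab => some lab
  | none =>
    match pvLoopSub labels t with
    | some lab => some lab
    | none => none

-- ===== PORT B =====
-- single pass: exact match returns immediately; first substring match is remembered as candidate
def pvOnePass (labels : List String) (t : String) (candidate : Option String) : Option String :=
  match labels with
  | [] => candidate
  | lab :: rest =>
      let low := PySem.Str.lower lab
      if low = t then some lab
      else if candidate = none ∧ (PySem.Str.isIn t low || PySem.Str.isIn low t) then
        pvOnePass rest t (some lab)
      else
        pvOnePass rest t candidate

def guess_label_py_alt (labels : List String) (target : String) : Option String :=
  pvOnePass labels (PySem.Str.lower target) none

-- ===== PRECONDITION & SPEC =====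
def Spec_guess_label_py (labels : List String) (target : String) (out : Option String) : Prop := out = guess_label_py_alt labels target
instance (labels : List String) (target : String) (out : Option String) : Decidable (Spec_guess_label_py labels target out) := by unfold Spec_guess_label_py; infer_instance

-- ===== CLAIM (what is proved, stated in full; the proofs are below) =====
def Claim_equal_guess_label_py : Prop := ∀ (labels : List String) (target : String), Dom_guess_label_py labels target → Spec_guess_label_py labels target (guess_label_py labels target)

-- ===== LEMMAS AND PROOFS =====

-- characterisation of B's one-pass loop in terms of A's two loops
theorem pvOnePass_eq (labels : List String) (t : String) (cand : Option String) :
    pvOnePass labels t cand =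
      match pvLoopExact labels t with
      | some lab => some lab
      | none =>
        match cand with
        | some c => some c
        | none => pvLoopSub labels t := by
  induction labels generalizing cand with
  | nil => cases cand <;> simp [pvOnePass, pvLoopExact, pvLoopSub]
  | cons lab rest ih =>
    by_cases hx : PySem.Str.lower lab = t
    · simp [pvOnePass, pvLoopExact, hx]
    · have hE : pvLoopExact (lab :: rest) t = pvLoopExact rest t := by
        simp [pvLoopExact, hx]
      have hstep : pvOnePass (lab :: rest) t cand =
          (if cand = none ∧ (PySem.Str.isIn t (PySem.Str.lower lab) ||
                             PySem.Str.isIn (PySem.Str.lower lab) t) = true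
           then pvOnePass rest t (some lab) else pvOnePass rest t cand) := by
        simp only [pvOnePass]
        rw [if_neg hx]
      rw [hstep, hE]
      by_cases hs : (PySem.Str.isIn t (PySem.Str.lower lab) ||
                     PySem.Str.isIn (PySem.Str.lower lab) t) = true
      · have hS : pvLoopSub (lab :: rest) t = some lab := by
          simp only [pvLoopSub]
          rw [if_pos hs]
        cases cand with
        | none =>
          rw [if_pos ⟨rfl, hs⟩, ih, hS]
        | some c =>
          rw [if_neg (by simp), ih]
      · have hS : pvLoopSub (lab :: rest) t = pvLoopSub rest t := by
          simp only [pvLoopSub]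
          rw [if_neg hs]
        rw [if_neg (fun h => hs h.2), ih, hS]

-- ===== VERDICT (by name: the statement is the Claim_ definition above) =====
theorem guess_label_py_spec : Claim_equal_guess_label_py := by
  intro labels target _
  unfold Spec_guess_label_py guess_label_py guess_label_py_alt
  rw [pvOnePass_eq]
  cases h1 : pvLoopExact labels (PySem.Str.lower target) <;>
    cases h2 : pvLoopSub labels (PySem.Str.lower target) <;> simp [h1, h2]
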